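-- pv_equiv track=rewrite | github.com/ravikiran437/gfg | Difficulty: Medium/ASCII Range Sum/ascii-range-sum.py | asciirange
-- ===== SOURCE A (Python) =====
-- def asciirange(s):
--     # code here
--     prefix = []
--     d = {}
--     for i in range(len(s)):
--         if s[i] not in d:
--             d[s[i]] = [i]
--         else:
--             d[s[i]].append(i)
--         if prefix == []:
--             prefix.append(ord(s[i]))
--         else:
--             prefix.append(prefix[-1] + ord(s[i]))
--
--     result = []
--
--     for value in d.values():
--         if len(value) >= 2:
--             if value[-1] - 1 != value[0]:
--                 result.append(prefix[value[-1]-1]-prefix[value[0]])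
--
--     return result
-- ===== SOURCE B (Python) =====
-- def asciirange(s):
--     # One pass recording only (first, last) occurrence per char (insertion order),
--     # then a direct slice sum per repeated char -- no prefix table, no occurrence lists.
--     span = {}
--     for i, c in enumerate(s):
--         first = span.get(c, (i, i))[0]
--         span[c] = (first, i)
--     result = []
--     for first, last in span.values():
--         if last - first > 1:
--             result.append(sum(ord(ch) for ch in s[first + 1:last]))
--     return result
-- ===== Notes on version B (the rewrite author's own statement) =====
-- stated objective: simpler
-- what changed: Replaces the prefix-sum table and per-character occurrence index lists by a single dict of (first,last) pairs and a direct slice sum per repeated character, with the guard last-first>1 instead of len>=2 and last-1!=first.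
import Mathlib
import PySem

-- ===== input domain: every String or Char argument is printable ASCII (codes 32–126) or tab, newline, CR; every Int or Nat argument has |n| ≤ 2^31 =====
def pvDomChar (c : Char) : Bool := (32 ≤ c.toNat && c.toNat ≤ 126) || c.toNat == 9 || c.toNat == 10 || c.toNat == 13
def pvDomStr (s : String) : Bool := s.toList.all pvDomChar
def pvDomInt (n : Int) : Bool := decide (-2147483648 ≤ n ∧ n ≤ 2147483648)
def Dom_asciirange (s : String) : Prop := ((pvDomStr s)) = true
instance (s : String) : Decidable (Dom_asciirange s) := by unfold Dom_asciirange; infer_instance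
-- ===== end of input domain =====

-- B replaces A's prefix-sum table and per-character occurrence lists by a dict of
-- (first,last) index pairs and a direct slice sum per repeated character (objective: simpler).

-- ===== PORT A =====
-- literal port of Source A; pyGetD is exact here: every index A uses is in range
def asciirange (s : String) : List Int :=
  let cs := s.toList
  let st :=
    (PySem.List.pyRange 0 (PySem.List.len cs) 1).foldl
      (fun (st : List Int × PySem.Dict Char (List Int)) i =>
        let c := PySem.List.pyGetD cs i ' '
        let d := if !st.2.contains c then st.2.insert c [i]
                 else st.2.modify c [] (fun l => l ++ [i])
        let pr := if st.1 = [] then st.1 ++ [(c.toNat : Int)]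
                  else st.1 ++ [PySem.List.pyGetD st.1 (-1) 0 + (c.toNat : Int)]
        (pr, d))
      ([], PySem.Dict.empty)
  st.2.values.foldl
    (fun result v =>
      if 2 ≤ v.length then
        if PySem.List.pyGetD v (-1) 0 - 1 ≠ PySem.List.pyGetD v 0 0 then
          result ++ [PySem.List.pyGetD st.1 (PySem.List.pyGetD v (-1) 0 - 1) 0
                      - PySem.List.pyGetD st.1 (PySem.List.pyGetD v 0 0) 0]
        else result
      else result)
    []

-- ===== PORT B =====
-- literal port of Source B
def asciirange_alt (s : String) : List Int :=
  let cs := s.toList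
  let span :=
    (PySem.List.enumerate cs).foldl
      (fun (d : PySem.Dict Char (Int × Int)) ic =>
        d.insert ic.2 ((d.getD ic.2 (ic.1, ic.1)).1, ic.1))
      PySem.Dict.empty
  span.values.foldl
    (fun result p =>
      if p.2 - p.1 > 1 then
        result ++ [(PySem.List.slice cs (some (p.1 + 1)) (some p.2)).foldl
                     (fun a ch => a + (ch.toNat : Int)) 0]
      else result)
    []

-- ===== PRECONDITION & SPEC =====
def Spec_asciirange (s : String) (out : List Int) : Prop := out = asciirange_alt s
instance (s : String) (out : List Int) : Decidable (Spec_asciirange s out) := by unfold Spec_asciirange; infer_instance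

-- ===== CLAIM (what is proved, stated in full; the proofs are below) =====
def Claim_equal_asciirange : Prop := ∀ (s : String), Dom_asciirange s → Spec_asciirange s (asciirange s)

-- ===== LEMMAS AND PROOFS =====

def sumOrds (l : List Char) : Int := l.foldl (fun a c => a + (c.toNat : Int)) 0

def occs (cs : List Char) (c : Char) : List Int :=
  ((PySem.List.enumerate cs).filter (fun p => p.2 == c)).map (fun p => p.1)

def prefT (cs : List Char) : List Int :=
  (List.range cs.length).map (fun j => sumOrds (List.take (j + 1) cs))

lemma foldl_add_shift (l : List Char) (a : Int) :
    l.foldl (fun a c => a + (c.toNat : Int)) a = a + sumOrds l := by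
  induction l generalizing a with
  | nil => simp [sumOrds]
  | cons x t ih =>
    simp only [List.foldl_cons, sumOrds] at *
    rw [ih (a + x.toNat), ih ((0:Int) + x.toNat)]; ring

lemma sumOrds_append (xs ys : List Char) : sumOrds (xs ++ ys) = sumOrds xs + sumOrds ys := by
  simp only [sumOrds, List.foldl_append]
  rw [show (List.foldl (fun a c => a + (c.toNat : Int)) 0 xs) = sumOrds xs from rfl, foldl_add_shift]; rfl

lemma prefix_eq (cs : List Char) :
    cs.foldl (fun pr c => if pr = [] then pr ++ [(c.toNat : Int)]
                          else pr ++ [PySem.List.pyGetD pr (-1) 0 + (c.toNat : Int)]) [] = prefT cs := by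
  induction cs using List.reverseRecOn with
  | nil => rfl
  | append_singleton t c ih =>
    rw [List.foldl_append, List.foldl_cons, List.foldl_nil, ih]
    cases t with
    | nil => simp [prefT, sumOrds]
    | cons y ys =>
      have hne : prefT (y :: ys) ≠ [] := by simp [prefT]
      rw [if_neg hne]
      have hlen : (y :: ys).length = ys.length + 1 := rfl
      -- prefT (y::ys) = prefT' ++ [sumOrds (y::ys)]
      have hsplit : prefT (y :: ys) =
          ((List.range ys.length).map (fun j => sumOrds (List.take (j + 1) (y :: ys)))) ++
            [sumOrds (y :: ys)] := by
        simp [prefT, List.range_succ, List.take_of_length_le]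
      rw [hsplit, PySem.List.pyGetD_neg_one_append_singleton]
      have : prefT ((y :: ys) ++ [c]) =
          ((List.range ys.length).map (fun j => sumOrds (List.take (j + 1) (y :: ys)))) ++
            [sumOrds (y :: ys)] ++ [sumOrds ((y :: ys) ++ [c])] := by
        simp only [prefT, List.length_append, hlen, List.length_cons, List.length_nil]
        rw [show ys.length + 1 + 1 = (ys.length + 1) + 1 from rfl, List.range_succ, List.range_succ]
        simp only [List.map_append, List.map_cons, List.map_nil, List.append_assoc]
        congr 1
        · apply List.map_congr_left
          intro j hj
          rw [List.mem_range] at hj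
          rw [List.take_append_of_le_length (by simpa [hlen] using by omega)]
        · congr 1
          · congr 1
            rw [List.take_append_of_le_length (by simp [hlen])]
            simp [List.take_of_length_le]
          · congr 1
            rw [List.take_of_length_le (by simp)]
      rw [this]
      rw [sumOrds_append]
      simp [sumOrds, List.append_assoc]

def dictA (cs : List Char) : PySem.Dict Char (List Int) :=
  ((PySem.List.enumerate cs).map Prod.swap).foldl
    (fun d q => d.modify q.1 [] (fun v => v ++ [q.2])) PySem.Dict.empty

def dictB (cs : List Char) : PySem.Dict Char (Int × Int) :=
  (PySem.List.enumerate cs).foldl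
    (fun d ic => d.insert ic.2 ((d.getD ic.2 (ic.1, ic.1)).1, ic.1)) PySem.Dict.empty

lemma keys_dictA (cs : List Char) : (dictA cs).keys = PySem.Set.ofList cs := by
  unfold dictA
  rw [PySem.Dict.keys_foldl_modify_key]
  simp [List.map_map, PySem.List.map_snd_enumerate, Function.comp_def]
  exact PySem.Set.update_empty cs

lemma nodup_keys_dictA (cs : List Char) : (dictA cs).keys.Nodup := by
  unfold dictA
  exact PySem.Dict.nodup_keys_foldl_modify_key _ _ _ _ _ (by simp [PySem.Dict.keys_empty])

lemma getD_dictA (cs : List Char) (c : Char) : (dictA cs).getD c [] = occs cs c := by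
  unfold dictA occs
  rw [PySem.Dict.getD_foldl_modify_append]
  simp [PySem.Dict.getD_empty, List.filter_map, List.map_map, Function.comp_def, Prod.swap]

lemma keys_dictB (cs : List Char) : (dictB cs).keys = PySem.Set.ofList cs := by
  unfold dictB
  rw [PySem.Dict.keys_foldl_insert_key]
  rw [show ((PySem.List.enumerate cs).map (fun q => q.2)) = cs from PySem.List.map_snd_enumerate cs 0]
  exact PySem.Set.update_empty cs

lemma nodup_keys_dictB (cs : List Char) : (dictB cs).keys.Nodup := by
  unfold dictB
  exact PySem.Dict.nodup_keys_foldl_insert_key _ _ _ _ (by simp [PySem.Dict.keys_empty])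

lemma occs_mem (cs : List Char) (c : Char) (i : Int) (h : i ∈ occs cs c) :
    ∃ k : Nat, i = (k : Int) ∧ k < cs.length := by
  simp only [occs, List.mem_map, List.mem_filter] at h
  obtain ⟨p, ⟨hp, -⟩, rfl⟩ := h
  rw [PySem.List.mem_enumerate_iff] at hp
  obtain ⟨k, hk, rfl⟩ := hp
  exact ⟨k, by simp, hk⟩

lemma occs_pairwise (cs : List Char) (c : Char) : (occs cs c).Pairwise (· < ·) := by
  have := PySem.List.pairwise_lt_enumerate cs 0
  exact List.Pairwise.map _ (fun a b h => h) (List.Pairwise.filter _ this)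

lemma occs_ne_nil (cs : List Char) (c : Char) (h : c ∈ cs) : occs cs c ≠ [] := by
  rw [List.mem_iff_getElem] at h
  obtain ⟨k, hk, rfl⟩ := h
  have : ((0 : Int) + k, cs[k]) ∈ PySem.List.enumerate cs := by
    rw [PySem.List.mem_enumerate_iff]; exact ⟨k, hk, rfl⟩
  intro hnil
  have : ((0 : Int) + k : Int) ∈ occs cs cs[k] := by
    simp only [occs, List.mem_map, List.mem_filter]
    exact ⟨_, ⟨this, by simp⟩, rfl⟩
  simp [hnil] at this

lemma head_last_pairwise (l : List Int) (hne : l ≠ []) (hp : l.Pairwise (· < ·)) :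
    l.headI ≤ (l.getLast?).getD 0 ∧ (2 ≤ l.length → l.headI < (l.getLast?).getD 0) ∧
      (l.length = 1 → l.headI = (l.getLast?).getD 0) := by
  match l with
  | [a] => simp
  | a :: b :: t =>
    have hmem : (b :: t).getLast (by simp) ∈ b :: t := List.getLast_mem _
    have hlt : a < (b :: t).getLast (by simp) := (List.pairwise_cons.mp hp).1 _ hmem
    have hgl : (a :: b :: t).getLast? = some ((b :: t).getLast (by simp)) := by
      rw [List.getLast?_eq_some_getLast (by simp)]
      simp [List.getLast_cons]
    refine ⟨?_, fun _ => ?_, fun h => by simp at h⟩ <;> simp [hgl] <;> omega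

lemma getB (l : List (Int × Char)) (d : PySem.Dict Char (Int × Int)) (c : Char) :
    (l.foldl (fun d ic => d.insert ic.2 ((d.getD ic.2 (ic.1, ic.1)).1, ic.1)) d).get? c =
      (if ((l.filter (fun p => p.2 == c)).map (fun p => p.1)) = [] then d.get? c
       else some ((d.get? c).elim ((l.filter (fun p => p.2 == c)).map (fun p => p.1)).headI Prod.fst,
                  (((l.filter (fun p => p.2 == c)).map (fun p => p.1)).getLast?).getD 0)) := by
  induction l generalizing d with
  | nil => simp
  | cons p t ih =>
    rw [List.foldl_cons, ih]
    by_cases hc : p.2 = c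
    · have hfil : (p :: t).filter (fun q => q.2 == c) = p :: t.filter (fun q => q.2 == c) := by
        simp [hc]
      rw [hfil]
      have hins : (d.insert p.2 ((d.getD p.2 (p.1, p.1)).1, p.1)).get? c =
          some ((d.getD c (p.1, p.1)).1, p.1) := by
        rw [← hc]; exact PySem.Dict.get?_insert_self _ _ _
      by_cases ht : (t.filter (fun q => q.2 == c)).map (fun q => q.1) = []
      · rw [if_pos ht, hins, if_neg (by simp [ht])]
        rw [PySem.Dict.getD_eq_get?_getD]
        cases d.get? c <;> simp [ht]
      · rw [if_neg ht, if_neg (by simp)]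
        rw [hins]
        obtain ⟨x, xs, hx⟩ := List.exists_cons_of_ne_nil ht
        rw [hx]
        rw [PySem.Dict.getD_eq_get?_getD]
        cases d.get? c <;> simp [List.map_cons, hx, List.getLast?_cons_cons]
    · have hfil : (p :: t).filter (fun q => q.2 == c) = t.filter (fun q => q.2 == c) := by
        simp [hc]
      have hget : (d.insert p.2 ((d.getD p.2 (p.1, p.1)).1, p.1)).get? c = d.get? c :=
        PySem.Dict.get?_insert_of_ne _ _ (fun h => hc h.symm)
      rw [hfil, hget]

lemma getD_dictB (cs : List Char) (c : Char) (h : c ∈ cs) :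
    (dictB cs).getD c (0, 0) = ((occs cs c).headI, ((occs cs c).getLast?).getD 0) := by
  have hocc : occs cs c ≠ [] := occs_ne_nil cs c h
  unfold dictB
  rw [PySem.Dict.getD_eq_get?_getD, getB]
  rw [if_neg (by exact hocc)]
  simp only [PySem.Dict.get?_empty, Option.elim, Option.getD_some]
  rfl

lemma values_dictA (cs : List Char) :
    (dictA cs).values = (PySem.Set.ofList cs).map (fun c => occs cs c) := by
  rw [PySem.Dict.values_eq_map_keys (dictA cs) (nodup_keys_dictA cs) [], keys_dictA]
  exact List.map_congr_left (fun c _ => getD_dictA cs c)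

lemma values_dictB (cs : List Char) :
    (dictB cs).values =
      (PySem.Set.ofList cs).map (fun c => ((occs cs c).headI, ((occs cs c).getLast?).getD 0)) := by
  rw [PySem.Dict.values_eq_map_keys (dictB cs) (nodup_keys_dictB cs) (0, 0), keys_dictB]
  exact List.map_congr_left (fun c hc => getD_dictB cs c ((PySem.Set.mem_ofList cs c).mp hc))

lemma prefT_getD (cs : List Char) (k : Nat) (hk : k < cs.length) :
    (prefT cs).getD k 0 = sumOrds (List.take (k + 1) cs) := by
  unfold prefT
  rw [List.getD_eq_getElem?_getD, List.getElem?_map]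
  simp [hk]

lemma guards_iff (cs : List Char) (c : Char) (h : c ∈ cs) :
    (2 ≤ (occs cs c).length ∧
        PySem.List.pyGetD (occs cs c) (-1) 0 - 1 ≠ PySem.List.pyGetD (occs cs c) 0 0) ↔
      ((occs cs c).getLast?).getD 0 - (occs cs c).headI > 1 := by
  have hne : occs cs c ≠ [] := occs_ne_nil cs c h
  obtain ⟨hle, hlt2, heq1⟩ := head_last_pairwise _ hne (occs_pairwise cs c)
  have hlast : PySem.List.pyGetD (occs cs c) (-1) 0 = ((occs cs c).getLast?).getD 0 := by
    rw [PySem.List.pyGetD_neg_one _ _ hne, List.getLast?_eq_some_getLast hne, Option.getD_some]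
  have hhead : PySem.List.pyGetD (occs cs c) 0 0 = (occs cs c).headI := by
    rw [PySem.List.pyGetD_zero]
    cases hx : occs cs c with
    | nil => exact absurd hx hne
    | cons a l => rfl
  rw [hlast, hhead]
  have hlen1 : 1 ≤ (occs cs c).length := List.length_pos_iff.mpr hne
  by_cases h2 : 2 ≤ (occs cs c).length
  · have := hlt2 h2
    constructor
    · rintro ⟨-, hne'⟩; omega
    · intro hg; exact ⟨h2, by omega⟩
  · have h1 : (occs cs c).length = 1 := by omega
    have := heq1 h1
    constructor
    · rintro ⟨h2', -⟩; omega
    · intro hg; omega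

lemma value_eq (cs : List Char) (c : Char) (h : c ∈ cs)
    (hg : ((occs cs c).getLast?).getD 0 - (occs cs c).headI > 1) :
    PySem.List.pyGetD (prefT cs) (PySem.List.pyGetD (occs cs c) (-1) 0 - 1) 0 -
        PySem.List.pyGetD (prefT cs) (PySem.List.pyGetD (occs cs c) 0 0) 0 =
      sumOrds (PySem.List.slice cs (some ((occs cs c).headI + 1))
                (some (((occs cs c).getLast?).getD 0))) := by
  have hne : occs cs c ≠ [] := occs_ne_nil cs c h
  have hlast : PySem.List.pyGetD (occs cs c) (-1) 0 = ((occs cs c).getLast?).getD 0 := by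
    rw [PySem.List.pyGetD_neg_one _ _ hne, List.getLast?_eq_some_getLast hne, Option.getD_some]
  have hhead : PySem.List.pyGetD (occs cs c) 0 0 = (occs cs c).headI := by
    rw [PySem.List.pyGetD_zero]
    cases hx : occs cs c with
    | nil => exact absurd hx hne
    | cons a l => rfl
  rw [hlast, hhead]
  have hmemh : (occs cs c).headI ∈ occs cs c := by
    obtain ⟨a, l, hx⟩ := List.exists_cons_of_ne_nil hne
    rw [hx]; exact List.mem_cons_self
  have hmemt : ((occs cs c).getLast?).getD 0 ∈ occs cs c := by
    rw [List.getLast?_eq_some_getLast hne, Option.getD_some]; exact List.getLast_mem hne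
  obtain ⟨hn, hhn, hnlt⟩ := occs_mem cs c _ hmemh
  obtain ⟨tn, htn, htlt⟩ := occs_mem cs c _ hmemt
  rw [hhn, htn] at hg ⊢
  have hord : hn + 2 ≤ tn := by omega
  have e1 : ((tn : Int) - 1) = ((tn - 1 : Nat) : Int) := by omega
  have e2 : ((hn : Int) + 1) = ((hn + 1 : Nat) : Int) := by omega
  rw [e1, e2, PySem.List.pyGetD_natCast, PySem.List.pyGetD_natCast, PySem.List.slice_natCast]
  rw [prefT_getD cs (tn - 1) (by omega), prefT_getD cs hn hnlt]
  have e3 : tn - 1 + 1 = tn := by omega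
  rw [e3]
  have e4 : List.take tn cs =
      List.take (hn + 1) cs ++ List.take (tn - (hn + 1)) (List.drop (hn + 1) cs) := by
    rw [← List.take_add]
    congr 1
    omega
  rw [e4, sumOrds_append]
  ring

lemma foldl_prod {α β γ : Type} (f : α → γ → α) (g : β → γ → β) (l : List γ) (a : α) (b : β) :
    l.foldl (fun st x => (f st.1 x, g st.2 x)) (a, b) = (l.foldl f a, l.foldl g b) := by
  induction l generalizing a b with
  | nil => rfl
  | cons x t ih => simpa using ih (f a x) (g b x)

-- A's main loop splits into the prefix-sum table and the occurrence dict
lemma loopA_eq (cs : List Char) :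
    (PySem.List.pyRange 0 (PySem.List.len cs) 1).foldl
      (fun (st : List Int × PySem.Dict Char (List Int)) i =>
        let c := PySem.List.pyGetD cs i ' '
        let d := if !st.2.contains c then st.2.insert c [i]
                 else st.2.modify c [] (fun l => l ++ [i])
        let pr := if st.1 = [] then st.1 ++ [(c.toNat : Int)]
                  else st.1 ++ [PySem.List.pyGetD st.1 (-1) 0 + (c.toNat : Int)]
        (pr, d))
      ([], PySem.Dict.empty)
    = (prefT cs, dictA cs) := by
  have h1 : (PySem.List.pyRange 0 (PySem.List.len cs) 1).foldl
      (fun (st : List Int × PySem.Dict Char (List Int)) i =>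
        let c := PySem.List.pyGetD cs i ' '
        let d := if !st.2.contains c then st.2.insert c [i]
                 else st.2.modify c [] (fun l => l ++ [i])
        let pr := if st.1 = [] then st.1 ++ [(c.toNat : Int)]
                  else st.1 ++ [PySem.List.pyGetD st.1 (-1) 0 + (c.toNat : Int)]
        (pr, d))
      ([], PySem.Dict.empty)
    = (PySem.List.enumerate cs).foldl
      (fun (st : List Int × PySem.Dict Char (List Int)) p =>
        ((fun pr (p : Int × Char) => if pr = [] then pr ++ [(p.2.toNat : Int)]
            else pr ++ [PySem.List.pyGetD pr (-1) 0 + (p.2.toNat : Int)]) st.1 p,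
         (fun (d : PySem.Dict Char (List Int)) (p : Int × Char) =>
            if !d.contains p.2 then d.insert p.2 [p.1]
            else d.modify p.2 [] (fun l => l ++ [p.1])) st.2 p))
      ([], PySem.Dict.empty) := by
    rw [PySem.List.enumerate_eq_map_pyRange cs ' ', List.foldl_map]
  rw [h1, foldl_prod
    (fun pr (p : Int × Char) => if pr = [] then pr ++ [(p.2.toNat : Int)]
        else pr ++ [PySem.List.pyGetD pr (-1) 0 + (p.2.toNat : Int)])
    (fun (d : PySem.Dict Char (List Int)) (p : Int × Char) =>
        if !d.contains p.2 then d.insert p.2 [p.1]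
        else d.modify p.2 [] (fun l => l ++ [p.1]))
    (PySem.List.enumerate cs) [] PySem.Dict.empty]
  rw [Prod.mk.injEq]
  constructor
  · -- prefix component
    have h2 : (PySem.List.enumerate cs).foldl
        (fun (pr : List Int) (p : Int × Char) => if pr = [] then pr ++ [(p.2.toNat : Int)]
            else pr ++ [PySem.List.pyGetD pr (-1) 0 + (p.2.toNat : Int)]) []
        = cs.foldl (fun pr c => if pr = [] then pr ++ [(c.toNat : Int)]
            else pr ++ [PySem.List.pyGetD pr (-1) 0 + (c.toNat : Int)]) [] := by
      conv_rhs => rw [← PySem.List.map_snd_enumerate cs 0, List.foldl_map]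
    rw [h2, prefix_eq]
  · -- dict component
    have h3 : ∀ (d : PySem.Dict Char (List Int)) (p : Int × Char),
        (if !d.contains p.2 then d.insert p.2 [p.1] else d.modify p.2 [] (fun l => l ++ [p.1]))
          = d.modify p.2 [] (fun l => l ++ [p.1]) := by
      intro d p
      by_cases hc : d.contains p.2
      · simp [hc]
      · rw [if_pos (by simp [hc])]
        show d.insert p.2 [p.1] = d.insert p.2 (d.getD p.2 [] ++ [p.1])
        have hg : d.getD p.2 [] = [] :=
          PySem.Dict.getD_of_not_contains d [] (by simpa using hc)
        rw [hg, List.nil_append]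
    have h4 : (PySem.List.enumerate cs).foldl
        (fun (d : PySem.Dict Char (List Int)) (p : Int × Char) =>
          if !d.contains p.2 then d.insert p.2 [p.1] else d.modify p.2 [] (fun l => l ++ [p.1]))
        PySem.Dict.empty
        = (PySem.List.enumerate cs).foldl
          (fun d p => d.modify p.2 [] (fun l => l ++ [p.1])) PySem.Dict.empty := by
      congr 1
      funext d p
      exact h3 d p
    rw [h4]
    unfold dictA
    rw [List.foldl_map]
    rfl

theorem main_eq (s : String) : asciirange s = asciirange_alt s := by
  simp only [asciirange, asciirange_alt]
  rw [loopA_eq]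
  dsimp only
  rw [values_dictA, show (List.foldl (fun (d : PySem.Dict Char (Int × Int)) ic => d.insert ic.2 ((d.getD ic.2 (ic.1, ic.1)).1, ic.1)) PySem.Dict.empty (PySem.List.enumerate s.toList)) = dictB s.toList from rfl, values_dictB]
  set cs := s.toList with hcs
  have stepA_eq : (fun (result : List Int) (v : List Int) =>
      if 2 ≤ v.length then
        if PySem.List.pyGetD v (-1) 0 - 1 ≠ PySem.List.pyGetD v 0 0 then
          result ++ [PySem.List.pyGetD (prefT cs) (PySem.List.pyGetD v (-1) 0 - 1) 0
                      - PySem.List.pyGetD (prefT cs) (PySem.List.pyGetD v 0 0) 0]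
        else result
      else result)
      = fun result v =>
        if (decide (2 ≤ v.length) &&
            decide (PySem.List.pyGetD v (-1) 0 - 1 ≠ PySem.List.pyGetD v 0 0)) = true then
          result ++ [PySem.List.pyGetD (prefT cs) (PySem.List.pyGetD v (-1) 0 - 1) 0
                      - PySem.List.pyGetD (prefT cs) (PySem.List.pyGetD v 0 0) 0]
        else result := by
    funext r v
    by_cases h1 : 2 ≤ v.length <;>
      by_cases h2 : PySem.List.pyGetD v (-1) 0 - 1 ≠ PySem.List.pyGetD v 0 0 <;>
        simp [h1, h2]
  have stepB_eq : (fun (result : List Int) (p : Int × Int) =>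
      if p.2 - p.1 > 1 then
        result ++ [(PySem.List.slice cs (some (p.1 + 1)) (some p.2)).foldl
                     (fun a ch => a + (ch.toNat : Int)) 0]
      else result)
      = fun result p =>
        if (decide (p.2 - p.1 > 1)) = true then
          result ++ [(PySem.List.slice cs (some (p.1 + 1)) (some p.2)).foldl
                       (fun a ch => a + (ch.toNat : Int)) 0]
        else result := by
    funext r p
    by_cases h1 : p.2 - p.1 > 1 <;> simp [h1]
  rw [stepA_eq, stepB_eq, PySem.List.foldl_append_if, PySem.List.foldl_append_if]
  simp only [List.nil_append, List.filter_map, List.map_map]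
  have hfil : (PySem.Set.ofList cs).filter
        ((fun v : List Int => decide (2 ≤ v.length) &&
            decide (PySem.List.pyGetD v (-1) 0 - 1 ≠ PySem.List.pyGetD v 0 0)) ∘ (fun c => occs cs c))
      = (PySem.Set.ofList cs).filter
        ((fun p : Int × Int => decide (p.2 - p.1 > 1)) ∘
          (fun c => ((occs cs c).headI, ((occs cs c).getLast?).getD 0))) := by
    apply List.filter_congr
    intro c hc
    have hmem : c ∈ cs := (PySem.Set.mem_ofList cs c).mp hc
    simp only [Function.comp_apply, ← Bool.decide_and]
    exact decide_eq_decide.mpr (guards_iff cs c hmem)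
  rw [hfil]
  apply List.map_congr_left
  intro c hc
  rw [List.mem_filter] at hc
  obtain ⟨hcK, hcond⟩ := hc
  have hmem : c ∈ cs := (PySem.Set.mem_ofList cs c).mp hcK
  simp only [Function.comp_apply, decide_eq_true_eq] at hcond ⊢
  exact value_eq cs c hmem hcond

-- ===== VERDICT (by name: the statement is the Claim_ definition above) =====
theorem asciirange_spec : Claim_equal_asciirange := by
  intro s _
  unfold Spec_asciirange
  exact main_eq s
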